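-- pv_equiv track=rewrite | github.com/michaeldwong/madeye | evaluation_tools.py | compute_when_an_orientation_was_last_visited
-- ===== SOURCE A (Python) =====
-- def compute_when_an_orientation_was_last_visited(trace_of_our_orientations, current_formation):
--     num_prior_shapes = len(trace_of_our_orientations)
--     orientation_to_last_seen = {}
--     for o in current_formation:
--         orientation_to_last_seen[o] = 6
--     if num_prior_shapes < 1:
--         return orientation_to_last_seen # the formula we use for mike's metric prioritize orientations we have not seen before
--         # and not seeing an orientation for 6 seconds gives the max benefit. there isn't any higher preference to an orientation that
--         # was seen 6 seconds ago vs 7 seconds ago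
--
--     index = num_prior_shapes - 1
--     while index >= 0:
--         for o in orientation_to_last_seen:
--             if o in set(trace_of_our_orientations[index]):
--                 orientation_to_last_seen[o] = num_prior_shapes - index - 1
--         index -= 1
--
--     return orientation_to_last_seen
-- ===== SOURCE B (Python) =====
-- def compute_when_an_orientation_was_last_visited(trace_of_our_orientations, current_formation):
--     n = len(trace_of_our_orientations)
--     result = {}
--     for o in current_formation:
--         result[o] = 6
--     # single forward pass: record the FIRST trace index at which each formation
--     # orientation appears
--     first_index = {}
--     for i, shapes in enumerate(trace_of_our_orientations):
--         for o in shapes: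
--             if o in result and o not in first_index:
--                 first_index[o] = i
--     for o, i in first_index.items():
--         result[o] = n - i - 1
--     return result
-- ===== Notes on version B (the rewrite author's own statement) =====
-- stated objective: faster
-- what changed: Replaced A's backward whole-trace scan that rebuilds set(trace[index]) and overwrites every formation key at every index with a single forward pass that records each formation orientation's first trace index once, then converts those indices to recency values.
import Mathlib
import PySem

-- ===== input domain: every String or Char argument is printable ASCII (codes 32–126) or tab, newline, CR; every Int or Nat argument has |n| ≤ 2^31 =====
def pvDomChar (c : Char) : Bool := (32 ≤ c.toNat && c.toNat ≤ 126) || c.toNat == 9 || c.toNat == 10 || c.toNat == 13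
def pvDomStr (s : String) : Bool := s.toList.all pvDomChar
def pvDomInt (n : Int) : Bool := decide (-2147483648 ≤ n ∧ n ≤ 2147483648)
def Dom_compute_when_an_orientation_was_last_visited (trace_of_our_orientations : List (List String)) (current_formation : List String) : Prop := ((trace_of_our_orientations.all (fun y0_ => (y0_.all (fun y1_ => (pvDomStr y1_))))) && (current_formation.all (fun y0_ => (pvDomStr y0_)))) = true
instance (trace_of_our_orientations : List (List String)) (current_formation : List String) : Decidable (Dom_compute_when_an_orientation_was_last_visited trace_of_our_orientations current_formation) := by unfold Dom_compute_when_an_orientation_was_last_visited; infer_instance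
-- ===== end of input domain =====

-- B replaces A's backward full-trace scan (which rebuilds set(trace[index]) and overwrites every
-- formation key at every index) by one forward pass recording each formation orientation's first
-- trace index, converted to a recency value at the end; objective: faster.

-- ===== PORT A =====
-- A's 'index = n-1; while index >= 0: ...; index -= 1' loop; fuel m means index = m - 1.
def pvWhileA (rows : List (List String)) (n : Int) :
    Nat → PySem.Dict String Int → PySem.Dict String Int
  | 0, d => d
  | m + 1, d =>
      pvWhileA rows n m
        (d.keys.foldl (fun d' o =>
          if o ∈ PySem.Set.ofList (PySem.List.pyGetD rows (m : Int) []) then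
            d'.insert o (n - (m : Int) - 1)
          else d') d)

def compute_when_an_orientation_was_last_visited (trace_of_our_orientations : List (List String)) (current_formation : List String) : List (String × Int) :=
  let num_prior_shapes : Int := trace_of_our_orientations.length
  let orientation_to_last_seen : PySem.Dict String Int :=
    current_formation.foldl (fun d o => d.insert o 6) PySem.Dict.empty
  if num_prior_shapes < 1 then orientation_to_last_seen.items
  else (pvWhileA trace_of_our_orientations num_prior_shapes
          trace_of_our_orientations.length orientation_to_last_seen).items

-- ===== PORT B =====
def compute_when_an_orientation_was_last_visited_alt (trace_of_our_orientations : List (List String)) (current_formation : List String) : List (String × Int) :=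
  let n : Int := trace_of_our_orientations.length
  let result : PySem.Dict String Int :=
    current_formation.foldl (fun d o => d.insert o 6) PySem.Dict.empty
  let firstIndex : PySem.Dict String Int :=
    (PySem.List.enumerate trace_of_our_orientations 0).foldl
      (fun fi p =>
        p.2.foldl (fun fi o =>
          if result.contains o && !(fi.contains o) then fi.insert o p.1 else fi) fi)
      PySem.Dict.empty
  (firstIndex.items.foldl (fun d p => d.insert p.1 (n - p.2 - 1)) result).items

-- ===== PRECONDITION & SPEC =====
def Spec_compute_when_an_orientation_was_last_visited (trace_of_our_orientations : List (List String)) (current_formation : List String) (out : List (String × Int)) : Prop := out = compute_when_an_orientation_was_last_visited_alt trace_of_our_orientations current_formation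
instance (trace_of_our_orientations : List (List String)) (current_formation : List String) (out : List (String × Int)) : Decidable (Spec_compute_when_an_orientation_was_last_visited trace_of_our_orientations current_formation out) := by unfold Spec_compute_when_an_orientation_was_last_visited; infer_instance

-- ===== CLAIM (what is proved, stated in full; the proofs are below) =====
def Claim_equal_compute_when_an_orientation_was_last_visited : Prop := ∀ (trace_of_our_orientations : List (List String)) (current_formation : List String), Dom_compute_when_an_orientation_was_last_visited trace_of_our_orientations current_formation → Spec_compute_when_an_orientation_was_last_visited trace_of_our_orientations current_formation (compute_when_an_orientation_was_last_visited trace_of_our_orientations current_formation)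

-- ===== LEMMAS AND PROOFS =====

-- first trace index at which k appears (the common specification of both loops)
def pvFirstHit (k : String) : List (List String) → Option Nat
  | [] => none
  | r :: rs => if k ∈ r then some 0 else (pvFirstHit k rs).map (· + 1)

-- accumulated value of A's countdown loop at key k
def pvAVal (rows : List (List String)) (n : Int) (k : String) : Nat → Int → Int
  | 0, v => v
  | m + 1, v => pvAVal rows n k m (if k ∈ rows.getD m [] then n - (m : Int) - 1 else v)

theorem pvFirstHit_append (k : String) (xs ys : List (List String)) :
    pvFirstHit k (xs ++ ys) =
      match pvFirstHit k xs with
      | some i => some i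
      | none => (pvFirstHit k ys).map (· + xs.length) := by
  induction xs with
  | nil => simp [pvFirstHit]
  | cons r rs ih =>
    by_cases h : k ∈ r
    · simp [pvFirstHit, h]
    · simp only [List.cons_append, pvFirstHit, h, if_neg, ih]
      cases pvFirstHit k rs <;> cases pvFirstHit k ys <;>
        simp [Option.map_map] <;> omega

theorem pv_getD_foldl_ite (ks : List String) (p : String → Prop) [DecidablePred p]
    (f : String → Int) (d : PySem.Dict String Int) (k : String) (dflt : Int) :
    (ks.foldl (fun d' o => if p o then d'.insert o (f o) else d') d).getD k dflt
      = if k ∈ ks ∧ p k then f k else d.getD k dflt := by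
  induction ks generalizing d with
  | nil => simp
  | cons o ks ih =>
    simp only [List.foldl_cons, ih]
    by_cases hp : p k
    · by_cases hmemks : k ∈ ks
      · simp [hmemks, hp]
      · by_cases hko : k = o
        · subst hko
          simp [hmemks, hp, PySem.Dict.getD_insert_self]
        · have hstep : (if p o then d.insert o (f o) else d).getD k dflt = d.getD k dflt := by
            by_cases hpo : p o
            · simp [hpo, PySem.Dict.getD_insert_of_ne _ _ _ hko]
            · simp [hpo]
          simp [hmemks, hko, hp, hstep]
    · have hstep : (if p o then d.insert o (f o) else d).getD k dflt = d.getD k dflt := by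
        by_cases hpo : p o
        · have hko : k ≠ o := fun h => hp (h ▸ hpo)
          simp [hpo, PySem.Dict.getD_insert_of_ne _ _ _ hko]
        · simp [hpo]
      simp [hp, hstep]

theorem pv_keys_foldl_ite (ks : List String) (p : String → Prop) [DecidablePred p]
    (f : String → Int) (d : PySem.Dict String Int)
    (h : ∀ o ∈ ks, o ∈ d.keys) :
    (ks.foldl (fun d' o => if p o then d'.insert o (f o) else d') d).keys = d.keys := by
  induction ks generalizing d with
  | nil => simp
  | cons o ks ih =>
    have ho : o ∈ d.keys := h o (by simp)
    by_cases hp : p o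
    · have hk : (d.insert o (f o)).keys = d.keys := by
        apply PySem.Dict.keys_insert_of_contains
        exact (PySem.Dict.contains_iff_mem_keys _ _).2 ho
      simp only [List.foldl_cons, if_pos hp]
      rw [ih (d.insert o (f o)) (by intro x hx; rw [hk]; exact h x (by simp [hx]))]
      exact hk
    · simp only [List.foldl_cons, if_neg hp]
      exact ih d (fun x hx => h x (by simp [hx]))

theorem pv_keys_pvWhileA (rows : List (List String)) (n : Int) (m : Nat)
    (d : PySem.Dict String Int) : (pvWhileA rows n m d).keys = d.keys := by
  induction m generalizing d with
  | zero => rfl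
  | succ m ih =>
    rw [pvWhileA, ih,
      pv_keys_foldl_ite _ _ _ _ (fun o ho => ho)]

theorem pv_getD_pvWhileA (rows : List (List String)) (n : Int) (m : Nat)
    (d : PySem.Dict String Int) (k : String) (hk : k ∈ d.keys) :
    (pvWhileA rows n m d).getD k 6 = pvAVal rows n k m (d.getD k 6) := by
  induction m generalizing d with
  | zero => rfl
  | succ m ih =>
    rw [pvWhileA, pvAVal]
    have hkeys := pv_keys_foldl_ite d.keys
      (fun o => o ∈ PySem.Set.ofList (PySem.List.pyGetD rows (m : Int) []))
      (fun _ => n - (m : Int) - 1) d (fun o ho => ho)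
    rw [ih _ (by rw [hkeys]; exact hk)]
    rw [pv_getD_foldl_ite]
    simp [hk, PySem.Set.mem_ofList, PySem.List.pyGetD_natCast]

theorem pv_pvAVal_eq (rows : List (List String)) (n : Int) (k : String) (m : Nat)
    (hm : m ≤ rows.length) (v : Int) :
    pvAVal rows n k m v =
      match pvFirstHit k (rows.take m) with
      | some i => n - (i : Int) - 1
      | none => v := by
  induction m generalizing v with
  | zero => simp [pvAVal, pvFirstHit]
  | succ m ih =>
    have hmlt : m < rows.length := by omega
    have hget : rows.getD m [] = rows[m] := List.getD_eq_getElem rows [] hmlt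
    have htake : rows.take (m + 1) = rows.take m ++ [rows[m]] := by
      rw [List.take_add_one]
      simp [List.getElem?_eq_getElem hmlt]
    have hlen : (rows.take m).length = m := by simp [hmlt.le]
    rw [pvAVal, ih (by omega), htake, pvFirstHit_append]
    cases hfh : pvFirstHit k (rows.take m) with
    | some i => simp [hfh]
    | none =>
      rw [hget]
      by_cases hmem : k ∈ rows[m]
      · simp [hfh, pvFirstHit, hmem, hlen]
      · simp [hfh, pvFirstHit, hmem]

theorem pv_getD_d0 (cf : List String) (d : PySem.Dict String Int) (k : String)
    (hd : d.getD k 6 = 6) :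
    (cf.foldl (fun d o => d.insert o 6) d).getD k 6 = 6 := by
  induction cf generalizing d with
  | nil => exact hd
  | cons o cf ih =>
    refine ih _ ?_
    by_cases hko : k = o
    · subst hko; exact PySem.Dict.getD_insert_self _ _ _ _
    · rw [PySem.Dict.getD_insert_of_ne _ _ _ hko]; exact hd

theorem pv_nodup_keys_foldl {α : Type} (l : List α)
    (g : PySem.Dict String Int → α → PySem.Dict String Int)
    (hg : ∀ d x, d.keys.Nodup → (g d x).keys.Nodup)
    (d : PySem.Dict String Int) (hd : d.keys.Nodup) : (l.foldl g d).keys.Nodup := by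
  induction l generalizing d with
  | nil => exact hd
  | cons x l ih => exact ih _ (hg d x hd)

theorem pvBInner_get? (shapes : List String) (res0 fi : PySem.Dict String Int)
    (i : Int) (k : String) :
    (shapes.foldl (fun fi o =>
        if res0.contains o && !(fi.contains o) then fi.insert o i else fi) fi).get? k
      = if res0.contains k = true ∧ fi.contains k = false ∧ k ∈ shapes then some i
        else fi.get? k := by
  induction shapes generalizing fi with
  | nil => simp
  | cons o shapes ih =>
    simp only [List.foldl_cons]
    by_cases hcond : (res0.contains o && !(fi.contains o)) = true
    · rw [if_pos hcond, ih]
      obtain ⟨hro, hfo⟩ : res0.contains o = true ∧ fi.contains o = false := by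
        simpa using hcond
      by_cases hko : k = o
      · subst hko
        rw [if_neg (fun h => by
              have := h.2.1
              rw [PySem.Dict.contains_insert_self] at this
              exact absurd this (by decide)),
            PySem.Dict.get?_insert_self,
            if_pos ⟨hro, hfo, by simp⟩]
      · have hc : (fi.insert o i).contains k = fi.contains k := by
          rw [PySem.Dict.contains_insert]
          simp [hko]
        have hg : (fi.insert o i).get? k = fi.get? k :=
          PySem.Dict.get?_insert_of_ne _ _ hko
        rw [hc, hg]
        exact if_congr (by simp [hko]) rfl rfl
    · rw [if_neg hcond, ih]
      by_cases hko : k = o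
      · subst hko
        have hnc : ¬(res0.contains k = true ∧ fi.contains k = false) := by
          rintro ⟨h1, h2⟩
          exact hcond (by rw [h1, h2]; rfl)
        rw [if_neg (fun h => hnc ⟨h.1, h.2.1⟩), if_neg (fun h => hnc ⟨h.1, h.2.1⟩)]
      · exact if_congr (by simp [hko]) rfl rfl

theorem pvBInner_contains (shapes : List String) (res0 fi : PySem.Dict String Int)
    (i : Int) (k : String) :
    (shapes.foldl (fun fi o =>
        if res0.contains o && !(fi.contains o) then fi.insert o i else fi) fi).contains k
      = if res0.contains k = true ∧ fi.contains k = false ∧ k ∈ shapes then true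
        else fi.contains k := by
  rw [PySem.Dict.contains_eq_isSome_get?, pvBInner_get?]
  by_cases h : res0.contains k = true ∧ fi.contains k = false ∧ k ∈ shapes
  · rw [if_pos h, if_pos h]; rfl
  · rw [if_neg h, if_neg h, ← PySem.Dict.contains_eq_isSome_get?]

theorem pvBOuter_get? (rows : List (List String)) (s : Int)
    (res0 fi : PySem.Dict String Int) (k : String) :
    ((PySem.List.enumerate rows s).foldl
        (fun fi p => p.2.foldl (fun fi o =>
            if res0.contains o && !(fi.contains o) then fi.insert o p.1 else fi) fi)
        fi).get? k
      = if res0.contains k = true ∧ fi.contains k = false then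
          (match pvFirstHit k rows with
           | some i => some (s + (i : Int))
           | none => none)
        else fi.get? k := by
  induction rows generalizing fi s with
  | nil =>
    simp only [PySem.List.enumerate_nil, List.foldl_nil, pvFirstHit]
    by_cases h : res0.contains k = true ∧ fi.contains k = false
    · rw [if_pos h]
      simpa using (PySem.Dict.get?_eq_none_iff_contains fi k).2 h.2
    · rw [if_neg h]
  | cons r rs ih =>
    rw [PySem.List.enumerate_cons, List.foldl_cons, ih]
    have hg := pvBInner_get? r res0 fi s k
    have hc := pvBInner_contains r res0 fi s k
    by_cases hr : res0.contains k = true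
    · by_cases hf : fi.contains k = false
      · by_cases hmem : k ∈ r
        · rw [if_pos ⟨hr, hf, hmem⟩] at hg hc
          rw [if_neg (fun h => by rw [hc] at h; exact absurd h.2 (by decide)), hg,
            if_pos ⟨hr, hf⟩]
          simp [pvFirstHit, hmem]
        · rw [if_neg (fun h => hmem h.2.2)] at hg hc
          rw [if_pos ⟨hr, by rw [hc]; exact hf⟩, if_pos ⟨hr, hf⟩]
          simp only [pvFirstHit, if_neg hmem]
          cases hfh : pvFirstHit k rs with
          | some i =>
            simp only [hfh, Option.map_some]
            congr 1
            push_cast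
            ring
          | none => simp [hfh]
      · rw [if_neg (fun h => hf h.2.1)] at hg hc
        have hft : fi.contains k = true := by
          cases h2 : fi.contains k
          · exact absurd h2 hf
          · rfl
        rw [if_neg (fun h => by rw [hc, hft] at h; exact absurd h.2 (by decide)), hg,
          if_neg (fun h => hf h.2)]
    · rw [if_neg (fun h => hr h.1)] at hg hc
      rw [if_neg (fun h => by rw [hc] at h; exact hr h.1), hg,
        if_neg (fun h => hr h.1)]

theorem pv_getD_foldl_pairs_notmem (ps : List (String × Int)) (n : Int)
    (d : PySem.Dict String Int) (k : String) (h : k ∉ ps.map Prod.fst) :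
    (ps.foldl (fun d p => d.insert p.1 (n - p.2 - 1)) d).getD k 6 = d.getD k 6 := by
  induction ps generalizing d with
  | nil => rfl
  | cons p ps ih =>
    simp only [List.map_cons, List.mem_cons, not_or] at h
    rw [List.foldl_cons, ih _ (h.2), PySem.Dict.getD_insert_of_ne _ _ _ h.1]

theorem pv_getD_foldl_pairs (ps : List (String × Int)) (n : Int)
    (hnd : (ps.map Prod.fst).Nodup) (d : PySem.Dict String Int) (k : String) :
    (ps.foldl (fun d p => d.insert p.1 (n - p.2 - 1)) d).getD k 6
      = match ps.find? (fun p => p.1 == k) with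
        | some p => n - p.2 - 1
        | none => d.getD k 6 := by
  induction ps generalizing d with
  | nil => rfl
  | cons p ps ih =>
    simp only [List.map_cons, List.nodup_cons] at hnd
    by_cases hk : p.1 = k
    · subst hk
      rw [List.foldl_cons, pv_getD_foldl_pairs_notmem _ _ _ _ hnd.1,
        PySem.Dict.getD_insert_self]
      simp
    · rw [List.foldl_cons, ih hnd.2]
      have : (p.1 == k) = false := by simp [hk]
      simp only [List.find?_cons, this]
      cases ps.find? (fun p => p.1 == k) with
      | some q => simp
      | none => simp [PySem.Dict.getD_insert_of_ne _ _ _ (Ne.symm hk)]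

theorem pv_keys_foldl_pairs (ps : List (String × Int)) (n : Int)
    (d : PySem.Dict String Int) (h : ∀ p ∈ ps, p.1 ∈ d.keys) :
    (ps.foldl (fun d p => d.insert p.1 (n - p.2 - 1)) d).keys = d.keys := by
  induction ps generalizing d with
  | nil => rfl
  | cons p ps ih =>
    have hk : (d.insert p.1 (n - p.2 - 1)).keys = d.keys := by
      apply PySem.Dict.keys_insert_of_contains
      exact (PySem.Dict.contains_iff_mem_keys _ _).2 (h p (by simp))
    rw [List.foldl_cons, ih _ (by intro q hq; rw [hk]; exact h q (by simp [hq])), hk]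

theorem pv_find?_items_eq (d : PySem.Dict String Int) (k : String) :
    d.items.find? (fun p => p.1 == k) = (d.get? k).map (fun v => (k, v)) := by
  obtain ⟨l⟩ := d
  induction l with
  | nil => rfl
  | cons p rest ih =>
    rw [PySem.Dict.get?_mk_cons]
    by_cases h : p.1 == k
    · have hk : p.1 = k := by simpa using h
      cases p
      simp_all [List.find?_cons]
    · simp only [List.find?_cons] at *
      simp only [h] at *
      simpa using ih

theorem pv_nodup_d0 (cf : List String) :
    (cf.foldl (fun d o => d.insert o 6) (PySem.Dict.empty : PySem.Dict String Int)).keys.Nodup := by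
  apply pv_nodup_keys_foldl
  · intro d x hd; exact PySem.Dict.nodup_keys_insert _ _ _ hd
  · exact PySem.Dict.nodup_keys_empty

theorem pv_fi_sub (rows : List (List String)) (res0 : PySem.Dict String Int) (k : String)
    (hk : k ∈ ((PySem.List.enumerate rows 0).foldl
        (fun fi p => p.2.foldl (fun fi o =>
            if res0.contains o && !(fi.contains o) then fi.insert o p.1 else fi) fi)
        (PySem.Dict.empty : PySem.Dict String Int)).keys) :
    k ∈ res0.keys := by
  have hc := (PySem.Dict.contains_iff_mem_keys _ k).2 hk
  rw [PySem.Dict.contains_eq_isSome_get?, pvBOuter_get? rows 0 res0 PySem.Dict.empty k] at hc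
  by_cases hr : res0.contains k = true
  · exact (PySem.Dict.contains_iff_mem_keys _ _).1 hr
  · exfalso
    rw [if_neg (fun h => hr h.1), PySem.Dict.get?_empty] at hc
    exact absurd hc (by decide)

theorem pv_nodup_fi (rows : List (List String)) (res0 : PySem.Dict String Int) :
    ((PySem.List.enumerate rows 0).foldl
        (fun fi p => p.2.foldl (fun fi o =>
            if res0.contains o && !(fi.contains o) then fi.insert o p.1 else fi) fi)
        (PySem.Dict.empty : PySem.Dict String Int)).keys.Nodup := by
  apply pv_nodup_keys_foldl
  · intro d p hd
    apply pv_nodup_keys_foldl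
    · intro d' o hd'
      by_cases hcc : (res0.contains o && !(d'.contains o)) = true
      · rw [if_pos hcc]; exact PySem.Dict.nodup_keys_insert _ _ _ hd'
      · rw [if_neg hcc]; exact hd'
    · exact hd
  · exact PySem.Dict.nodup_keys_empty

-- ===== VERDICT (by name: the statement is the Claim_ definition above) =====
theorem compute_when_an_orientation_was_last_visited_spec : Claim_equal_compute_when_an_orientation_was_last_visited := by
  intro trace cf _
  unfold Spec_compute_when_an_orientation_was_last_visited
  cases trace with
  | nil => rfl
  | cons r rs =>
    simp only [compute_when_an_orientation_was_last_visited,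
      compute_when_an_orientation_was_last_visited_alt]
    rw [if_neg (by simp)]
    set trace := r :: rs with htrace
    set n : Int := (trace.length : Int) with hn
    set d0 : PySem.Dict String Int :=
      cf.foldl (fun d o => d.insert o 6) PySem.Dict.empty with hd0def
    set fi : PySem.Dict String Int :=
      (PySem.List.enumerate trace 0).foldl
        (fun fi p => p.2.foldl (fun fi o =>
            if d0.contains o && !(fi.contains o) then fi.insert o p.1 else fi) fi)
        PySem.Dict.empty with hfidef
    have hnd0 : d0.keys.Nodup := pv_nodup_d0 cf
    have hAkeys : (pvWhileA trace n trace.length d0).keys = d0.keys :=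
      pv_keys_pvWhileA trace n trace.length d0
    have hfisub : ∀ p ∈ fi.items, p.1 ∈ d0.keys := by
      intro p hp
      exact pv_fi_sub trace d0 p.1 (PySem.Dict.mem_keys_of_mem_items _ hp)
    have hBkeys : (fi.items.foldl (fun d p => d.insert p.1 (n - p.2 - 1)) d0).keys = d0.keys :=
      pv_keys_foldl_pairs fi.items n d0 hfisub
    have hnodfi : (fi.items.map Prod.fst).Nodup := pv_nodup_fi trace d0
    rw [PySem.Dict.items_eq_map_keys _ (by rw [hAkeys]; exact hnd0) 6,
        PySem.Dict.items_eq_map_keys _ (by rw [hBkeys]; exact hnd0) 6,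
        hAkeys, hBkeys]
    apply List.map_congr_left
    intro k hk
    have hd06 : d0.getD k 6 = 6 := pv_getD_d0 cf PySem.Dict.empty k rfl
    have hAval : (pvWhileA trace n trace.length d0).getD k 6
        = match pvFirstHit k trace with
          | some i => n - (i : Int) - 1
          | none => 6 := by
      rw [pv_getD_pvWhileA trace n trace.length d0 k hk,
          pv_pvAVal_eq trace n k trace.length (le_refl _), List.take_length, hd06]
    have hfik : fi.get? k
        = match pvFirstHit k trace with
          | some i => some ((0 : Int) + (i : Int))
          | none => none := by
      rw [hfidef, pvBOuter_get? trace 0 d0 PySem.Dict.empty k,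
          if_pos ⟨(PySem.Dict.contains_iff_mem_keys _ _).2 hk, rfl⟩]
    have hBval : (fi.items.foldl (fun d p => d.insert p.1 (n - p.2 - 1)) d0).getD k 6
        = match pvFirstHit k trace with
          | some i => n - (i : Int) - 1
          | none => 6 := by
      rw [pv_getD_foldl_pairs fi.items n hnodfi d0 k, pv_find?_items_eq fi k, hfik]
      cases pvFirstHit k trace with
      | some i => simp
      | none => simp [hd06]
    rw [hAval, hBval]
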